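-- pv_equiv track=rewrite | github.com/CYBER-4RMY/PSSWD-Checker | PSSWD-Checker.py | check_common
-- ===== SOURCE A (Python) =====
-- from typing import Iterable, List, Optional, Tuple
--
-- LEET_MAP = str.maketrans({
--     "4": "a", "@": "a",
--     "8": "b",
--     "3": "e",
--     "6": "g",
--     "1": "i", "!": "i", "l": "l",
--     "0": "o",
--     "5": "s", "$": "s",
--     "7": "t"
-- })
--
-- def leet_normalize(s: str) -> str:
--     """Return a lowercase, leet-normalized version for comparison against common words."""
--     return s.translate(LEET_MAP).lower()
--
-- def check_common(password: str, common_set: Iterable[str]) -> bool: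
--     """Return True if not common."""
--     p_lower = password.lower()
--     if p_lower in common_set:
--         return False
--     # leet-normalize and compare
--     normalized = leet_normalize(password)
--     if normalized in common_set:
--         return False
--     # also test substrings (e.g. 'password123')
--     for common in common_set:
--         if common and common in p_lower:
--             return False
--         if common and common in normalized:
--             return False
--     return True
-- ===== SOURCE B (Python) =====
-- LEET_MAP = str.maketrans({
--     "4": "a", "@": "a",
--     "8": "b",
--     "3": "e",
--     "6": "g",
--     "1": "i", "!": "i", "l": "l",
--     "0": "o",
--     "5": "s", "$": "s",
--     "7": "t"
-- })
--
-- def check_common(password, common_set):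
--     """Return True if not common: hash-set of words + per-length substring probes."""
--     words = set(common_set)
--     lengths = {len(w) for w in words if w}
--     p = password.lower()
--     n = password.translate(LEET_MAP).lower()
--     if p in words:
--         return False
--     for s in (p, n):
--         for i in range(len(s)):
--             for L in lengths:
--                 if s[i:i + L] in words:
--                     return False
--     return True
-- ===== Notes on version B (the rewrite author's own statement) =====
-- stated objective: alternative
-- what changed: B builds a hash-set of the common words and the set of occurring word lengths once, then for each start position of the lowered and leet-normalized password probes only the substrings of those lengths against the set; A's inner scan over every common word disappears (much faster for large word lists, comparable or slower for a long password with few words).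
import Mathlib
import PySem

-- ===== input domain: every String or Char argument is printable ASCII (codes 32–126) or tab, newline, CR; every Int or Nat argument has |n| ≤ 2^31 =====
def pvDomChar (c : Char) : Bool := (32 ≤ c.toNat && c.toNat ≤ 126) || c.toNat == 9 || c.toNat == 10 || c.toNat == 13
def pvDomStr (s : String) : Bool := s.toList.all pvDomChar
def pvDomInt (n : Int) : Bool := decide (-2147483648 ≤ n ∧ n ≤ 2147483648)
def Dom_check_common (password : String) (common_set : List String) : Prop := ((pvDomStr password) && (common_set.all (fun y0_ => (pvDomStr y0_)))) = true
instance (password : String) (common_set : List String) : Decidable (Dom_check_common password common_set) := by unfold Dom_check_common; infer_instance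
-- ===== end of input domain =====

-- B replaces A's per-common-word double substring scan by one hash-set of words plus, for each
-- start position, probes of the candidate substrings of each occurring word length (objective: alternative).

-- shared helper: the LEET_MAP character translation (str.translate), used by both Pythons
def leetChar (c : Char) : Char :=
  if c = '4' then 'a' else if c = '@' then 'a'
  else if c = '8' then 'b'
  else if c = '3' then 'e'
  else if c = '6' then 'g'
  else if c = '1' then 'i' else if c = '!' then 'i'
  else if c = '0' then 'o'
  else if c = '5' then 's' else if c = '$' then 's'
  else if c = '7' then 't'
  else c

-- ===== PORT A =====
def leet_normalize (s : String) : String :=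
  PySem.Str.lower (String.ofList (s.toList.map leetChar))

def check_common (password : String) (common_set : List String) : Bool :=
  let p_lower := PySem.Str.lower password
  if common_set.contains p_lower then false
  else
    let normalized := leet_normalize password
    if common_set.contains normalized then false
    else if common_set.any (fun c =>
        (!(c == "") && PySem.Str.isIn c p_lower) || (!(c == "") && PySem.Str.isIn c normalized)) then false
    else true

-- ===== PORT B =====
def check_common_alt (password : String) (common_set : List String) : Bool :=
  let words : PySem.Set String := PySem.Set.ofList common_set
  let lengths : PySem.Set Int :=
    PySem.Set.ofList ((words.filter (fun w => !(w == ""))).map (fun w => PySem.Str.len w))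
  let p := PySem.Str.lower password
  let n := PySem.Str.lower (String.ofList (password.toList.map leetChar))
  if words.contains p then false
  else if [p, n].any (fun s =>
      (PySem.List.pyRange 0 (PySem.Str.len s)).any (fun i =>
        lengths.any (fun L => words.contains (PySem.Str.slice s (some i) (some (i + L)))))) then false
  else true

-- ===== PRECONDITION & SPEC =====
def Spec_check_common (password : String) (common_set : List String) (out : Bool) : Prop := out = check_common_alt password common_set
instance (password : String) (common_set : List String) (out : Bool) : Decidable (Spec_check_common password common_set out) := by unfold Spec_check_common; infer_instance

-- ===== CLAIM (what is proved, stated in full; the proofs are below) =====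
def Claim_equal_check_common : Prop := ∀ (password : String) (common_set : List String), Dom_check_common password common_set → Spec_check_common password common_set (check_common password common_set)

-- ===== LEMMAS AND PROOFS =====

-- "some nonempty common word occurs in s" — the condition both scans decide
def MatchIn (s : String) (common : List String) : Prop :=
  ∃ c ∈ common, c ≠ "" ∧ c.toList <:+: s.toList

-- A's loop decides MatchIn p ∨ MatchIn n
lemma a_loop_iff (p n : String) (common : List String) :
    common.any (fun c =>
        (!(c == "") && PySem.Str.isIn c p) || (!(c == "") && PySem.Str.isIn c n)) = true
      ↔ MatchIn p common ∨ MatchIn n common := by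
  simp only [List.any_eq_true, Bool.or_eq_true, Bool.and_eq_true, Bool.not_eq_true',
    beq_eq_false_iff_ne, PySem.Str.isIn_iff_infix, MatchIn]
  constructor
  · rintro ⟨c, hc, ⟨hne, hin⟩ | ⟨hne, hin⟩⟩
    · exact Or.inl ⟨c, hc, hne, hin⟩
    · exact Or.inr ⟨c, hc, hne, hin⟩
  · rintro (⟨c, hc, hne, hin⟩ | ⟨c, hc, hne, hin⟩)
    · exact ⟨c, hc, Or.inl ⟨hne, hin⟩⟩
    · exact ⟨c, hc, Or.inr ⟨hne, hin⟩⟩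

-- B's position × length scan of one string decides MatchIn
lemma b_scan_iff (s : String) (common : List String) :
    ((PySem.List.pyRange 0 (PySem.Str.len s)).any (fun i =>
        (PySem.Set.ofList ((( PySem.Set.ofList common).filter (fun w => !(w == ""))).map
            (fun w => PySem.Str.len w))).any (fun L =>
          (PySem.Set.ofList common).contains (PySem.Str.slice s (some i) (some (i + L)))))) = true
      ↔ MatchIn s common := by
  simp only [List.any_eq_true, PySem.Set.contains, List.contains_iff_mem, MatchIn]
  constructor
  · rintro ⟨i, hi, L, hL, hc⟩
    rw [PySem.List.mem_pyRange_one, PySem.Str.len_eq] at hi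
    obtain ⟨hi0, hilt⟩ := hi
    rw [PySem.Set.mem_ofList] at hL
    obtain ⟨w, hwf, rfl⟩ := List.mem_map.1 hL
    obtain ⟨-, hwne⟩ := List.mem_filter.1 hwf
    have hwne' : w.toList.length ≠ 0 := by
      simp only [Bool.not_eq_true', beq_eq_false_iff_ne] at hwne
      simp [hwne]
    set c := PySem.Str.slice s (some i) (some (i + PySem.Str.len w)) with hcdef
    have hk : i = ((i.toNat : Nat) : Int) := by omega
    have hclist : c.toList = (s.toList.drop i.toNat).take w.toList.length := by
      rw [hcdef, PySem.Str.toList_slice, PySem.Chars.slice_eq_listSlice]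
      rw [hk, PySem.Str.len_eq]
      rw [show ((i.toNat : Nat) : Int) + ((w.toList.length : Nat) : Int)
            = ((i.toNat + w.toList.length : Nat) : Int) by push_cast; ring]
      rw [PySem.List.slice_natCast]
      congr 1
      omega
    refine ⟨c, PySem.Set.mem_ofList _ _ |>.1 hc, ?_, ?_⟩
    · intro h
      have h0 : ([] : List Char) = (s.toList.drop i.toNat).take w.toList.length := by
        simpa [h] using hclist
      rcases List.take_eq_nil_iff.mp h0.symm with h1 | h1
      · exact hwne' h1
      · rw [List.drop_eq_nil_iff] at h1; omega
    · rw [hclist]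
      exact (List.take_prefix _ _).isInfix.trans (List.drop_suffix _ _).isInfix
  · rintro ⟨c, hc, hcne, pre, suf, hsplit⟩
    have hcne' : c.toList.length ≠ 0 := by
      simp [hcne]
    have hlen : pre.length + c.toList.length + suf.length = s.toList.length := by
      rw [← hsplit]; simp only [List.length_append]
    refine ⟨(pre.length : Int), ?_, PySem.Str.len c, ?_, ?_⟩
    · rw [PySem.List.mem_pyRange_one, PySem.Str.len_eq]
      omega
    · rw [PySem.Set.mem_ofList]
      exact List.mem_map.2 ⟨c, List.mem_filter.2 ⟨(PySem.Set.mem_ofList _ _).2 hc,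
        by simpa [Bool.not_eq_true', beq_eq_false_iff_ne] using hcne⟩, rfl⟩
    · have hdrop : s.toList.drop pre.length = c.toList ++ suf := by
        rw [← hsplit, List.append_assoc, List.drop_left]
      have heq : (PySem.Str.slice s (some (pre.length : Int))
          (some ((pre.length : Int) + PySem.Str.len c))).toList = c.toList := by
        rw [PySem.Str.toList_slice, PySem.Chars.slice_eq_listSlice, PySem.Str.len_eq]
        rw [show ((pre.length : Nat) : Int) + ((c.toList.length : Nat) : Int)
              = ((pre.length + c.toList.length : Nat) : Int) by push_cast; ring]
        rw [PySem.List.slice_natCast, hdrop]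
        rw [show pre.length + c.toList.length - pre.length = c.toList.length by omega]
        exact List.take_left
      rw [String.toList_inj.mp heq]
      exact (PySem.Set.mem_ofList _ _).2 hc

-- p and n are simultaneously empty
lemma p_empty_iff_n_empty (password : String) :
    (PySem.Str.lower password = "" ↔ leet_normalize password = "") := by
  unfold leet_normalize
  rw [← String.toList_eq_nil_iff, ← String.toList_eq_nil_iff]
  simp [PySem.Str.lower, PySem.Chars.lower]

-- A's if-chain returns False exactly on these inputs
lemma a_false_iff (password : String) (common_set : List String) :
    check_common password common_set = false ↔
      (PySem.Str.lower password ∈ common_set ∨ leet_normalize password ∈ common_set ∨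
       MatchIn (PySem.Str.lower password) common_set ∨
       MatchIn (leet_normalize password) common_set) := by
  unfold check_common
  dsimp only
  split_ifs with h1 h2 h3
  · exact iff_of_true rfl (Or.inl (List.contains_iff_mem.mp h1))
  · exact iff_of_true rfl (Or.inr (Or.inl (List.contains_iff_mem.mp h2)))
  · exact iff_of_true rfl (Or.inr (Or.inr ((a_loop_iff _ _ _).1 h3)))
  · refine iff_of_false (by simp) ?_
    rintro (h | h | h)
    · exact h1 (List.contains_iff_mem.mpr h)
    · exact h2 (List.contains_iff_mem.mpr h)
    · exact h3 ((a_loop_iff _ _ _).2 h)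

-- B's if-chain returns False exactly on these inputs
lemma b_false_iff (password : String) (common_set : List String) :
    check_common_alt password common_set = false ↔
      (PySem.Str.lower password ∈ common_set ∨
       MatchIn (PySem.Str.lower password) common_set ∨
       MatchIn (leet_normalize password) common_set) := by
  unfold check_common_alt
  dsimp only
  split_ifs with h1 h2
  · refine iff_of_true rfl (Or.inl ?_)
    rw [PySem.Set.contains, List.contains_iff_mem, PySem.Set.mem_ofList] at h1
    exact h1
  · simp only [List.any_cons, List.any_nil, Bool.or_false, Bool.or_eq_true] at h2
    refine iff_of_true rfl (Or.inr ?_)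
    rcases h2 with h | h
    · exact Or.inl ((b_scan_iff _ _).1 h)
    · exact Or.inr ((b_scan_iff _ _).1 h)
  · simp only [List.any_cons, List.any_nil, Bool.or_false, Bool.or_eq_true, not_or] at h2
    refine iff_of_false (by simp) ?_
    rintro (h | h | h)
    · refine h1 ?_
      rw [PySem.Set.contains, List.contains_iff_mem, PySem.Set.mem_ofList]
      exact h
    · exact h2.1 ((b_scan_iff _ _).2 h)
    · exact h2.2 ((b_scan_iff _ _).2 h)

-- ===== VERDICT (by name: the statement is the Claim_ definition above) =====
theorem check_common_spec : Claim_equal_check_common := by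
  intro password common_set _
  unfold Spec_check_common
  have hiff : check_common password common_set = false ↔
      check_common_alt password common_set = false := by
    rw [a_false_iff, b_false_iff]
    constructor
    · rintro (h | h | h | h)
      · exact Or.inl h
      · by_cases he : leet_normalize password = ""
        · left
          rw [(p_empty_iff_n_empty password).2 he]
          rwa [he] at h
        · exact Or.inr (Or.inr ⟨_, h, he, List.infix_rfl⟩)
      · exact Or.inr (Or.inl h)
      · exact Or.inr (Or.inr h)
    · rintro (h | h | h)
      · exact Or.inl h
      · exact Or.inr (Or.inr (Or.inl h))
      · exact Or.inr (Or.inr (Or.inr h))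
  cases hA : check_common password common_set <;>
    cases hB : check_common_alt password common_set <;> simp_all
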